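-- pv_equiv track=rewrite | github.com/isaiahchen28/TwitterAnalysis | analysis.py | co_occurrent_terms
-- ===== SOURCE A (Python) =====
-- from operator import itemgetter
--
-- def co_occurrent_terms(com, n):
--     '''
--     Calculate the most frequent co-occurrent terms that appear in the data.
--
--     **Parameters**
--
--         com: *collections.defaultdict*
--             The co-occurence matrix generated by the appropriate function.
--         n: *int*
--             The number of pairs of terms to be returned.
--
--     **Returns**
--
--         terms_max: *list, tuple*
--             The list of n pairs of terms that appear together in same Tweet
--             the most frequent, along with the number of times they appear
--             together.
--     '''
--     com_max = []
--     for t1 in com: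
--         # For each term in the co-occurrence matrix, sort according to
--         # frequency
--         t1_max_terms = sorted(
--             com[t1].items(), key=itemgetter(1), reverse=True)[:n]
--         for t2, count in t1_max_terms:
--             # Add each pairing to com_max
--             com_max.append(((t1, t2), count))
--     # Sort the output list by frequency
--     terms_max = sorted(com_max, key=itemgetter(1), reverse=True)
--     return terms_max[:n]
-- ===== SOURCE B (Python) =====
-- def co_occurrent_terms(com, n):
--     # Bucket every pair by its count, then emit buckets in decreasing count order.
--     groups = {}
--     for t1 in com:
--         for t2, count in com[t1].items():
--             groups.setdefault(count, []).append(((t1, t2), count))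
--     result = []
--     for count in sorted(groups, reverse=True):
--         result += groups[count]
--     return result[:n]
-- ===== Notes on version B (the rewrite author's own statement) =====
-- stated objective: alternative
-- what changed: B replaces A's per-key sort-and-truncate plus global comparison sort by a bucketing scheme: one pass groups every ((t1,t2),count) pair into a dict keyed by count, then the distinct counts are sorted descending and the buckets concatenated in that order, taking the first n; bucket order equals the stable-sort order, and A's per-row top-n is redundant for n >= 0.
import Mathlib
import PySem

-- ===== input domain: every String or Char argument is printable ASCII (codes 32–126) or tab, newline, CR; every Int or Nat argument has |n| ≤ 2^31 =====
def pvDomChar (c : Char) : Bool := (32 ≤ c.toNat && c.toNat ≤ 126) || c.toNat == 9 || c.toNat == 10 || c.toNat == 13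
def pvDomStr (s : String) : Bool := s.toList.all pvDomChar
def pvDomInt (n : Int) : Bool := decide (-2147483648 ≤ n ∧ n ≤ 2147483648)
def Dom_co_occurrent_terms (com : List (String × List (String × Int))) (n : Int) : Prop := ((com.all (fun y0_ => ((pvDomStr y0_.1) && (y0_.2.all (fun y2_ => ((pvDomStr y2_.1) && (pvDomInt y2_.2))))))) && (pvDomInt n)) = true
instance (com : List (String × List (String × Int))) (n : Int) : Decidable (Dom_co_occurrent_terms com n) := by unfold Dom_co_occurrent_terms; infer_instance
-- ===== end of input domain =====

-- B replaces A's per-key sort-and-truncate plus global comparison sort by bucketing: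
-- pairs are grouped in a dict keyed by count, and the buckets are emitted in decreasing
-- count order ([:n] once at the end); objective: alternative.  Pre_ excludes negative n (see there).

-- ===== PORT A =====
-- the Python dicts arrive as association lists; both ports read them through PySem.Dict
def pvToDict (com : List (String × List (String × Int))) : PySem.Dict String (PySem.Dict String Int) :=
  PySem.Dict.ofList (com.map (fun p => (p.1, PySem.Dict.ofList p.2)))

def co_occurrent_terms (com : List (String × List (String × Int))) (n : Int) : List ((String × String) × Int) :=
  let d := pvToDict com
  let com_max := d.items.foldl (fun acc p =>
    let t1_max_terms := PySem.List.slice (PySem.List.sorted p.2.items (fun q => q.2) true) none (some n)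
    t1_max_terms.foldl (fun a q => a ++ [((p.1, q.1), q.2)]) acc) []
  let terms_max := PySem.List.sorted com_max (fun q => q.2) true
  PySem.List.slice terms_max none (some n)

-- ===== PORT B =====
def co_occurrent_terms_alt (com : List (String × List (String × Int))) (n : Int) : List ((String × String) × Int) :=
  let d := pvToDict com
  -- groups.setdefault(count, []).append(…)  =  modify count (default []) (· ++ [pair])
  let groups := d.items.foldl (fun g p =>
    p.2.items.foldl (fun g q => g.modify q.2 [] (· ++ [((p.1, q.1), q.2)])) g)
    (PySem.Dict.empty : PySem.Dict Int (List ((String × String) × Int)))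
  -- groups[count] is always present for count in groups: ported as getD with default []
  let result := (PySem.List.sorted groups.keys (fun c => c) true).foldl
    (fun acc c => acc ++ groups.getD c []) []
  PySem.List.slice result none (some n)

-- ===== PRECONDITION & SPEC =====
-- Pre_ excludes negative n, on which A's per-row list[:n] slices keep all but the last |n|
-- items of each row -- a truncation artefact of the Python slice that no caller of a
-- top-n selection would specify -- so A can drop pairs that B's buckets keep.
def Pre_co_occurrent_terms (com : List (String × List (String × Int))) (n : Int) : Prop := 0 ≤ n
instance (com : List (String × List (String × Int))) (n : Int) : Decidable (Pre_co_occurrent_terms com n) := by unfold Pre_co_occurrent_terms; infer_instance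

def pvWitness_co_occurrent_terms : (List (String × List (String × Int))) × Int :=
  ([("a", [("x", 1), ("y", 2)]), ("b", [("z", 3)])], 2)

def Spec_co_occurrent_terms (com : List (String × List (String × Int))) (n : Int) (out : List ((String × String) × Int)) : Prop := out = co_occurrent_terms_alt com n
instance (com : List (String × List (String × Int))) (n : Int) (out : List ((String × String) × Int)) : Decidable (Spec_co_occurrent_terms com n out) := by unfold Spec_co_occurrent_terms; infer_instance

-- ===== CLAIM (what is proved, stated in full; the proofs are below) =====
def Claim_equal_co_occurrent_terms : Prop := ∀ (com : List (String × List (String × Int))) (n : Int), Dom_co_occurrent_terms com n → Pre_co_occurrent_terms com n → Spec_co_occurrent_terms com n (co_occurrent_terms com n)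

-- ===== LEMMAS AND PROOFS =====

def pvIns {α κ : Type} [LinearOrder κ] (key : α → κ) (x : α) (s : List α) : List α :=
  PySem.List.insertBy (fun a b => decide (key b < key a)) x s
def pvS {α κ : Type} [LinearOrder κ] (key : α → κ) (l : List α) : List α :=
  PySem.List.sorted l key true
def pvFoldIns {α κ : Type} [LinearOrder κ] (key : α → κ) (l : List α) (s : List α) : List α :=
  l.foldl (fun acc x => pvIns key x acc) s

lemma pvIns_cons {α κ : Type} [LinearOrder κ] (key : α → κ) (x a : α) (s : List α) :
    pvIns key x (a :: s) = if key a < key x then x :: a :: s else a :: pvIns key x s := by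
  simp [pvIns, PySem.List.insertBy]

lemma pvS_eq_foldIns {α κ : Type} [LinearOrder κ] (key : α → κ) (l : List α) :
    pvS key l = pvFoldIns key l [] := by
  rw [pvS, PySem.List.sorted_rev_eq_foldl_insertBy]; rfl

lemma pvFoldIns_append {α κ : Type} [LinearOrder κ] (key : α → κ) (l₁ l₂ : List α) (s : List α) :
    pvFoldIns key (l₁ ++ l₂) s = pvFoldIns key l₂ (pvFoldIns key l₁ s) := by
  simp [pvFoldIns, List.foldl_append]

lemma pvIns_perm {α κ : Type} [LinearOrder κ] (key : α → κ) (x : α) (s : List α) :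
    (pvIns key x s).Perm (x :: s) := by
  induction s with
  | nil => simp [pvIns, PySem.List.insertBy]
  | cons a s ih =>
    rw [pvIns_cons]
    split
    · exact List.Perm.refl _
    · exact (ih.cons a).trans (List.Perm.swap x a s)

lemma pvIns_countP {α κ : Type} [LinearOrder κ] (key : α → κ) (x : α) (s : List α) (p : α → Bool) :
    (pvIns key x s).countP p = s.countP p + if p x then 1 else 0 := by
  rw [(pvIns_perm key x s).countP_eq]
  simp [List.countP_cons]

lemma pvIns_pairwise {α κ : Type} [LinearOrder κ] (key : α → κ) (x : α) (s : List α)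
    (hs : s.Pairwise (fun a b => key b ≤ key a)) :
    (pvIns key x s).Pairwise (fun a b => key b ≤ key a) := by
  have h1 : pvS key s = s := PySem.List.sorted_rev_eq_self_of_pairwise s key hs
  have h2 : pvS key (s ++ [x]) = pvIns key x s := by
    rw [pvS_eq_foldIns, pvFoldIns_append, ← pvS_eq_foldIns, h1]; rfl
  rw [← h2]; exact PySem.List.sorted_pairwise_rev _ _

lemma pvTake_eq_of_take_eq {α : Type} {k m : Nat} (hk : k ≤ m) {s₁ s₂ : List α}
    (h : s₁.take m = s₂.take m) : s₁.take k = s₂.take k := by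
  have : s₁.take k = (s₁.take m).take k := by rw [List.take_take, Nat.min_eq_left hk]
  rw [this, h, List.take_take, Nat.min_eq_left hk]

lemma pvIns_take_eq {α κ : Type} [LinearOrder κ] (key : α → κ) (x : α) :
    ∀ (n : Nat) (s₁ s₂ : List α), s₁.take n = s₂.take n →
    (pvIns key x s₁).take n = (pvIns key x s₂).take n := by
  intro n
  induction n with
  | zero => intro s₁ s₂ _; simp
  | succ m ih =>
    intro s₁ s₂ h
    match s₁, s₂ with
    | [], [] => rfl
    | [], b :: s₂ => simp [List.take_succ_cons] at h
    | a :: s₁, [] => simp [List.take_succ_cons] at h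
    | a :: s₁, b :: s₂ =>
      simp only [List.take_succ_cons, List.cons.injEq] at h
      obtain ⟨rfl, ht⟩ := h
      rw [pvIns_cons, pvIns_cons]
      split
      · simp only [List.take_succ_cons]
        exact congrArg (x :: ·) (pvTake_eq_of_take_eq (Nat.le_succ m)
          (by simpa [List.take_succ_cons] using congrArg (a :: ·) ht))
      · simp only [List.take_succ_cons]
        exact congrArg (a :: ·) (ih s₁ s₂ ht)

lemma pvIns_take_of_countP {α κ : Type} [LinearOrder κ] (key : α → κ) (x : α) :
    ∀ (n : Nat) (s : List α), s.Pairwise (fun a b => key b ≤ key a) →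
    n ≤ s.countP (fun y => decide (key x ≤ key y)) →
    (pvIns key x s).take n = s.take n := by
  intro n
  induction n with
  | zero => intro s _ _; simp
  | succ m ih =>
    intro s hp hc
    match s with
    | [] => simp at hc
    | a :: s =>
      rw [pvIns_cons]
      split
      · -- key a < key x: every element fails the count predicate, contradiction
        exfalso
        rename_i hlt
        have hz : (a :: s).countP (fun y => decide (key x ≤ key y)) = 0 := by
          rw [List.countP_eq_zero]
          intro y hy
          simp only [decide_eq_true_eq, not_le]
          rcases List.mem_cons.mp hy with rfl | hy
          · exact hlt
          · exact lt_of_le_of_lt (List.rel_of_pairwise_cons hp hy) hlt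
        omega
      · simp only [List.take_succ_cons]
        refine congrArg (a :: ·) (ih s hp.of_cons ?_)
        rw [List.countP_cons] at hc
        split_ifs at hc <;> omega

lemma pvFoldIns_take_eq {α κ : Type} [LinearOrder κ] (key : α → κ) (l : List α) :
    ∀ (n : Nat) (s₁ s₂ : List α), s₁.take n = s₂.take n →
    (pvFoldIns key l s₁).take n = (pvFoldIns key l s₂).take n := by
  induction l with
  | nil => intro n s₁ s₂ h; exact h
  | cons x l ih =>
    intro n s₁ s₂ h
    exact ih n _ _ (pvIns_take_eq key x n s₁ s₂ h)

lemma pvFoldIns_pairwise {α κ : Type} [LinearOrder κ] (key : α → κ) (l : List α) :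
    ∀ (s : List α), s.Pairwise (fun a b => key b ≤ key a) →
    (pvFoldIns key l s).Pairwise (fun a b => key b ≤ key a) := by
  induction l with
  | nil => intro s hs; exact hs
  | cons x l ih => intro s hs; exact ih _ (pvIns_pairwise key x s hs)

lemma pvFoldIns_countP {α κ : Type} [LinearOrder κ] (key : α → κ) (l : List α) :
    ∀ (s : List α) (p : α → Bool),
    (pvFoldIns key l s).countP p = s.countP p + l.countP p := by
  induction l with
  | nil => intro s p; simp [pvFoldIns]
  | cons x l ih =>
    intro s p
    rw [pvFoldIns, List.foldl_cons, ← pvFoldIns, ih, pvIns_countP, List.countP_cons]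
    omega

lemma pvFoldIns_take_of_countP {α κ : Type} [LinearOrder κ] (key : α → κ) (n : Nat) :
    ∀ (l s : List α), s.Pairwise (fun a b => key b ≤ key a) →
    (∀ x ∈ l, n ≤ s.countP (fun y => decide (key x ≤ key y))) →
    (pvFoldIns key l s).take n = s.take n := by
  intro l
  induction l with
  | nil => intro s _ _; rfl
  | cons x l ih =>
    intro s hs hc
    rw [pvFoldIns, List.foldl_cons, ← pvFoldIns]
    have h1 : (pvIns key x s).take n = s.take n :=
      pvIns_take_of_countP key x n s hs (hc x (List.mem_cons_self ..))
    rw [← h1]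
    refine ih (pvIns key x s) (pvIns_pairwise key x s hs) ?_
    intro y hy
    rw [pvIns_countP]
    have := hc y (List.mem_cons_of_mem _ hy)
    omega

lemma pvFoldIns_row_take {α κ : Type} [LinearOrder κ] (key : α → κ) (n : Nat) (r s : List α)
    (hr : r.Pairwise (fun a b => key b ≤ key a))
    (hs : s.Pairwise (fun a b => key b ≤ key a)) :
    (pvFoldIns key r s).take n = (pvFoldIns key (r.take n) s).take n := by
  conv_lhs => rw [← List.take_append_drop n r]
  rw [pvFoldIns_append]
  refine pvFoldIns_take_of_countP key n (r.drop n) _ (pvFoldIns_pairwise key _ _ hs) ?_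
  intro x hx
  rw [pvFoldIns_countP]
  have hlen : (r.take n).length = n := by
    rw [List.length_take]
    rcases Nat.lt_or_ge n r.length with h | h
    · omega
    · exfalso; rw [List.drop_eq_nil_of_le h] at hx; exact List.not_mem_nil hx
  have h0 : (r.take n ++ r.drop n).Pairwise (fun a b => key b ≤ key a) := by
    rw [List.take_append_drop]; exact hr
  have hall : ∀ y ∈ r.take n, key x ≤ key y :=
    fun y hy => (List.pairwise_append.mp h0).2.2 y hy x hx
  have hcnt : (r.take n).countP (fun y => decide (key x ≤ key y)) = (r.take n).length :=
    List.countP_eq_length.mpr (fun y hy => decide_eq_true (hall y hy))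
  omega

lemma pvMain_rows {α κ : Type} [LinearOrder κ] (key : α → κ) (n : Nat) :
    ∀ (rows : List (List α)) (s₁ s₂ : List α),
    (∀ r ∈ rows, r.Pairwise (fun a b => key b ≤ key a)) →
    s₁.Pairwise (fun a b => key b ≤ key a) → s₂.Pairwise (fun a b => key b ≤ key a) →
    s₁.take n = s₂.take n →
    (pvFoldIns key (rows.flatMap id) s₁).take n =
    (pvFoldIns key (rows.flatMap (fun r => r.take n)) s₂).take n := by
  intro rows
  induction rows with
  | nil => intro s₁ s₂ _ _ _ h; exact h
  | cons r rows ih =>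
    intro s₁ s₂ hrows h1 h2 h
    rw [List.flatMap_cons, List.flatMap_cons, pvFoldIns_append, pvFoldIns_append]
    have hr : r.Pairwise (fun a b => key b ≤ key a) := hrows r (List.mem_cons_self ..)
    refine ih _ _ (fun r' hr' => hrows r' (List.mem_cons_of_mem _ hr'))
      (pvFoldIns_pairwise key _ _ h1) (pvFoldIns_pairwise key _ _ h2) ?_
    calc (pvFoldIns key r s₁).take n
        = (pvFoldIns key (r.take n) s₁).take n := pvFoldIns_row_take key n r s₁ hr h1
      _ = (pvFoldIns key (r.take n) s₂).take n := pvFoldIns_take_eq key _ n s₁ s₂ h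

lemma pvFilter_pvIns {α κ : Type} [LinearOrder κ] (key : α → κ) (x : α) (k : κ) :
    ∀ (s : List α), s.Pairwise (fun a b => key b ≤ key a) →
    (pvIns key x s).filter (fun y => decide (key y = k)) =
    (if key x = k then s.filter (fun y => decide (key y = k)) ++ [x]
     else s.filter (fun y => decide (key y = k))) := by
  intro s
  induction s with
  | nil => intro _; simp [pvIns, PySem.List.insertBy, List.filter]; split <;> simp_all
  | cons a s ih =>
    intro hp
    rw [pvIns_cons]
    split
    · rename_i hlt
      -- key a < key x : everything in a :: s has key < key x
      by_cases hxk : key x = k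
      · have hz : (a :: s).filter (fun y => decide (key y = k)) = [] := by
          rw [List.filter_eq_nil_iff]
          intro y hy
          simp only [decide_eq_true_eq]
          rcases List.mem_cons.mp hy with rfl | hy'
          · exact fun h => absurd (h ▸ hlt) (by rw [hxk]; exact lt_irrefl k)
          · intro h
            have h1 : key y ≤ key a := List.rel_of_pairwise_cons hp hy'
            have : key y < key x := lt_of_le_of_lt h1 hlt
            rw [h, hxk] at this; exact lt_irrefl k this
        rw [if_pos hxk, hz]
        simp [hxk, hz]
      · rw [if_neg hxk]
        simp [List.filter_cons, hxk]
    · rename_i hge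
      rw [List.filter_cons, List.filter_cons, ih hp.of_cons]
      split <;> split <;> simp_all

lemma pvS_filter {α κ : Type} [LinearOrder κ] (key : α → κ) (l : List α) (k : κ) :
    (pvS key l).filter (fun y => decide (key y = k)) = l.filter (fun y => decide (key y = k)) := by
  induction l using List.reverseRecOn with
  | nil => rfl
  | append_singleton l x ih =>
    have hsnoc : pvS key (l ++ [x]) = pvIns key x (pvS key l) := by
      rw [pvS_eq_foldIns, pvFoldIns_append, ← pvS_eq_foldIns]; rfl
    rw [hsnoc, pvFilter_pvIns key x k (pvS key l) (PySem.List.sorted_pairwise_rev l key),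
      List.filter_append, ih]
    split <;> rename_i h <;> simp [List.filter, h]

lemma pvSorted_unique {α κ : Type} [LinearOrder κ] (key : α → κ) :
    ∀ (xs ys : List α), xs.Pairwise (fun a b => key b ≤ key a) →
    ys.Pairwise (fun a b => key b ≤ key a) →
    (∀ k : κ, xs.filter (fun y => decide (key y = k)) = ys.filter (fun y => decide (key y = k))) →
    xs = ys := by
  intro xs
  induction xs with
  | nil =>
    intro ys _ _ hf
    cases ys with
    | nil => rfl
    | cons b ys =>
      exfalso
      have := hf (key b)
      simp at this
  | cons a xs ih =>
    intro ys hx hy hf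
    cases ys with
    | nil =>
      exfalso
      have := hf (key a)
      simp at this
    | cons b ys =>
      have hab : a = b := by
        by_cases h : key a = key b
        · have h1 := hf (key a)
          rw [List.filter_cons, List.filter_cons] at h1
          rw [if_pos (by simp), if_pos (by simp [h.symm])] at h1
          exact List.head_eq_of_cons_eq h1
        · exfalso
          have h1 := hf (key a)
          rw [List.filter_cons, List.filter_cons] at h1
          rw [if_pos (by simp), if_neg (by simp; exact fun hh => h hh.symm)] at h1
          have ha_mem : a ∈ ys := by
            have : a ∈ List.filter (fun y => decide (key y = key a)) ys := by
              rw [← h1]; exact List.mem_cons_self ..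
            exact List.mem_of_mem_filter this
          have hle1 : key a ≤ key b := List.rel_of_pairwise_cons hy ha_mem
          have h2 := hf (key b)
          rw [List.filter_cons, List.filter_cons] at h2
          rw [if_neg (by simpa using h), if_pos (by simp)] at h2
          have hb_mem : b ∈ xs := by
            have : b ∈ List.filter (fun y => decide (key y = key b)) xs := by
              rw [h2]; exact List.mem_cons_self ..
            exact List.mem_of_mem_filter this
          have hle2 : key b ≤ key a := List.rel_of_pairwise_cons hx hb_mem
          exact h (le_antisymm hle1 hle2)
      subst hab
      have htails : ∀ k : κ, xs.filter (fun y => decide (key y = k)) =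
          ys.filter (fun y => decide (key y = k)) := by
        intro k
        have := hf k
        rw [List.filter_cons, List.filter_cons] at this
        by_cases h : key a = k
        · simp only [decide_eq_true h, if_true] at this
          exact List.tail_eq_of_cons_eq this
        · simpa only [decide_eq_false h, if_false] using this
      exact congrArg (a :: ·) (ih ys hx.of_cons hy.of_cons htails)

lemma pvS_eq_of_filters {α κ : Type} [LinearOrder κ] (key : α → κ) (l₁ l₂ : List α)
    (h : ∀ k : κ, l₁.filter (fun y => decide (key y = k)) = l₂.filter (fun y => decide (key y = k))) :
    pvS key l₁ = pvS key l₂ := by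
  refine pvSorted_unique key _ _ (PySem.List.sorted_pairwise_rev l₁ key)
    (PySem.List.sorted_pairwise_rev l₂ key) ?_
  intro k
  rw [pvS_filter, pvS_filter]
  exact h k

lemma pvIns_map {α β κ : Type} [LinearOrder κ] (key₁ : α → κ) (key₂ : β → κ) (f : α → β)
    (hf : ∀ a, key₂ (f a) = key₁ a) (x : α) :
    ∀ (s : List α), (pvIns key₁ x s).map f = pvIns key₂ (f x) (s.map f) := by
  intro s
  induction s with
  | nil => rfl
  | cons a s ih =>
    rw [pvIns_cons, List.map_cons, pvIns_cons, hf, hf]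
    split
    · rfl
    · rw [List.map_cons, ih]

lemma pvS_map {α β κ : Type} [LinearOrder κ] (key₁ : α → κ) (key₂ : β → κ) (f : α → β)
    (hf : ∀ a, key₂ (f a) = key₁ a) (l : List α) :
    (pvS key₁ l).map f = pvS key₂ (l.map f) := by
  induction l using List.reverseRecOn with
  | nil => rfl
  | append_singleton l x ih =>
    have hs1 : pvS key₁ (l ++ [x]) = pvIns key₁ x (pvS key₁ l) := by
      rw [pvS_eq_foldIns, pvFoldIns_append, ← pvS_eq_foldIns]; rfl
    have hs2 : pvS key₂ (l.map f ++ [f x]) = pvIns key₂ (f x) (pvS key₂ (l.map f)) := by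
      rw [pvS_eq_foldIns, pvFoldIns_append, ← pvS_eq_foldIns]; rfl
    rw [hs1, pvIns_map key₁ key₂ f hf, ih, List.map_append, List.map_singleton, hs2]

theorem pvTopn_eq {α κ : Type} [LinearOrder κ] (key : α → κ) (n : Nat) (rows : List (List α)) :
    (pvS key (rows.flatMap (fun r => (pvS key r).take n))).take n =
    (pvS key (rows.flatMap id)).take n := by
  have h1 : pvS key (rows.flatMap id) = pvS key ((rows.map (pvS key)).flatMap id) := by
    refine pvS_eq_of_filters key _ _ ?_
    intro k
    rw [List.filter_flatMap, List.filter_flatMap, List.flatMap_map]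
    congr 1
    funext r
    rw [id, id, pvS_filter]
  have h2 : (pvS key ((rows.map (pvS key)).flatMap id)).take n =
      (pvS key ((rows.map (pvS key)).flatMap (fun r => r.take n))).take n := by
    rw [pvS_eq_foldIns, pvS_eq_foldIns]
    exact pvMain_rows key n (rows.map (pvS key)) [] [] (by
      intro r hr
      obtain ⟨r₀, _, rfl⟩ := List.mem_map.mp hr
      exact PySem.List.sorted_pairwise_rev r₀ key) (List.Pairwise.nil) (List.Pairwise.nil) rfl
  have h3 : (rows.map (pvS key)).flatMap (fun r => r.take n) =
      rows.flatMap (fun r => (pvS key r).take n) := List.flatMap_map _ _ _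
  rw [h1, h2, h3]

-- ===== the bucket side: sorted-by-key equals concatenation of buckets in descending key order =====

lemma pvSortedKeys_strict {κ : Type} [LinearOrder κ] (ks : List κ) (hnd : ks.Nodup) :
    (PySem.List.sorted ks (fun c => c) true).Pairwise (fun a b => b < a) := by
  have hp := PySem.List.sorted_pairwise_rev ks (fun c => c)
  have hnd' : (PySem.List.sorted ks (fun c => c) true).Nodup :=
    ((PySem.List.sorted_perm ks (fun c => c) true).nodup_iff).mpr hnd
  exact (hp.and hnd').imp (fun h => lt_of_le_of_ne h.1 (Ne.symm h.2))

lemma pvFlat_pairwise {α κ : Type} [LinearOrder κ] (key : α → κ) (l : List α) :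
    ∀ ks : List κ, ks.Pairwise (fun a b => b < a) →
    (ks.flatMap (fun c => l.filter (fun y => decide (key y = c)))).Pairwise
      (fun a b => key b ≤ key a) := by
  intro ks
  induction ks with
  | nil => intro _; simp
  | cons c t ih =>
    intro hp
    rw [List.flatMap_cons, List.pairwise_append]
    refine ⟨?_, ih hp.of_cons, ?_⟩
    · refine List.pairwise_of_forall_mem_list ?_
      intro a ha b hb
      have ha' := (List.mem_filter.mp ha).2
      have hb' := (List.mem_filter.mp hb).2
      simp only [decide_eq_true_eq] at ha' hb'
      rw [ha', hb']
    · intro a ha b hb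
      have ha' := (List.mem_filter.mp ha).2
      obtain ⟨c', hc', hb'⟩ := List.mem_flatMap.mp hb
      have hb'' := (List.mem_filter.mp hb').2
      simp only [decide_eq_true_eq] at ha' hb''
      rw [ha', hb'']
      exact le_of_lt (List.rel_of_pairwise_cons hp hc')

lemma pvFlat_filter {α κ : Type} [LinearOrder κ] (key : α → κ) (l : List α) (k : κ) :
    ∀ ks : List κ, ks.Nodup →
    (ks.flatMap (fun c => l.filter (fun y => decide (key y = c)))).filter
      (fun y => decide (key y = k)) =
    if k ∈ ks then l.filter (fun y => decide (key y = k)) else [] := by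
  intro ks
  induction ks with
  | nil => intro _; simp
  | cons c t ih =>
    intro hnd
    rw [List.flatMap_cons, List.filter_append, ih (List.nodup_cons.mp hnd).2]
    by_cases hck : c = k
    · subst hck
      have hkt : c ∉ t := (List.nodup_cons.mp hnd).1
      rw [if_neg hkt, if_pos (List.mem_cons_self ..), List.append_nil, List.filter_filter]
      exact List.filter_congr (fun y _ => by simp)
    · have hz : (l.filter (fun y => decide (key y = c))).filter
          (fun y => decide (key y = k)) = [] := by
        rw [List.filter_filter, List.filter_eq_nil_iff]
        intro y _
        simp only [Bool.and_eq_true, decide_eq_true_eq, not_and]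
        intro h1 h2; exact hck (h2 ▸ h1 ▸ rfl)
      rw [hz, List.nil_append]
      by_cases hkt : k ∈ t
      · rw [if_pos hkt, if_pos (List.mem_cons_of_mem _ hkt)]
      · have hnotc : k ∉ c :: t := by
          intro h
          rcases List.mem_cons.mp h with h | h
          · exact hck h.symm
          · exact hkt h
        rw [if_neg hkt, if_neg hnotc]

lemma pvS_eq_buckets {α κ : Type} [LinearOrder κ] (key : α → κ) (l : List α) (ks : List κ)
    (hnd : ks.Nodup) (hmem : ∀ c, c ∈ ks ↔ c ∈ l.map key) :
    (PySem.List.sorted ks (fun c => c) true).flatMap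
      (fun c => l.filter (fun y => decide (key y = c))) = pvS key l := by
  have hperm := PySem.List.sorted_perm ks (fun c => c) true
  have hnd' : (PySem.List.sorted ks (fun c => c) true).Nodup := hperm.nodup_iff.mpr hnd
  refine pvSorted_unique key _ _
    (pvFlat_pairwise key l _ (pvSortedKeys_strict ks hnd))
    (PySem.List.sorted_pairwise_rev l key) ?_
  intro k
  rw [pvS_filter, pvFlat_filter key l k _ hnd']
  by_cases hk : k ∈ PySem.List.sorted ks (fun c => c) true
  · rw [if_pos hk]
  · rw [if_neg hk]
    symm
    rw [List.filter_eq_nil_iff]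
    intro y hy
    simp only [decide_eq_true_eq]
    intro hkey
    exact hk (hperm.mem_iff.mpr ((hmem k).mpr (List.mem_map.mpr ⟨y, hy, hkey⟩)))

-- ===== assembling the two ports =====
theorem pvPorts_eq (com : List (String × List (String × Int))) (n : Int) (hn : 0 ≤ n) :
    co_occurrent_terms com n = co_occurrent_terms_alt com n := by
  unfold co_occurrent_terms co_occurrent_terms_alt
  set d := pvToDict com with hd
  set key : (String × String) × Int → Int := fun q => q.2 with hkey
  set key2 : String × Int → Int := fun q => q.2 with hkey2
  set m := n.toNat with hm
  set g : String × PySem.Dict String Int → String × Int → (String × String) × Int :=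
    fun p q => ((p.1, q.1), q.2) with hg
  set l : List ((String × String) × Int) := d.items.flatMap (fun p => p.2.items.map (g p))
    with hl
  -- ===== A reduces to (pvS key l).take m =====
  simp only [PySem.List.foldl_append_singleton_eq_map, PySem.List.foldl_append_eq_flatMap,
    List.nil_append]
  rw [PySem.List.slice_to _ hn, PySem.List.slice_to _ hn]
  have hrowA : ∀ p : String × PySem.Dict String Int,
      (PySem.List.slice (PySem.List.sorted p.2.items key2 true) none (some n)).map (g p) =
      (pvS key (p.2.items.map (g p))).take m := by
    intro p
    rw [PySem.List.slice_to _ hn, List.map_take, ← hm]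
    congr 1
    exact pvS_map key2 key (g p) (fun a => rfl) p.2.items
  have hA : (d.items.flatMap fun p =>
      (PySem.List.slice (PySem.List.sorted p.2.items key2 true) none (some n)).map (g p)) =
      (d.items.map (fun p => p.2.items.map (g p))).flatMap (fun r => (pvS key r).take m) := by
    rw [List.flatMap_map]
    exact List.flatMap_congr (fun p _ => hrowA p)
  have hAside : (PySem.List.sorted (d.items.flatMap fun p =>
      (PySem.List.slice (PySem.List.sorted p.2.items key2 true) none (some n)).map (g p))
      key true).take m = (pvS key l).take m := by
    rw [hA]
    show (pvS key ((d.items.map (fun p => p.2.items.map (g p))).flatMap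
      (fun r => (pvS key r).take m))).take m = (pvS key l).take m
    rw [pvTopn_eq key m (d.items.map (fun p => p.2.items.map (g p))), List.flatMap_map]
    simp only [id_eq]
    rw [← hl]
  rw [hAside]
  -- ===== B reduces to the bucket concatenation =====
  -- the nested grouping loop is one fold over the flat pair list mapped to (count, pair)
  have hnest : (d.items.foldl (fun g' p =>
      p.2.items.foldl (fun gg q => gg.modify q.2 [] (· ++ [((p.1, q.1), q.2)])) g')
      (PySem.Dict.empty : PySem.Dict Int (List ((String × String) × Int)))) =
      ((l.map (fun x => (x.2, x))).foldl
        (fun gg x => gg.modify x.1 [] (· ++ [x.2])) PySem.Dict.empty) := by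
    rw [hl, List.map_flatMap, List.foldl_flatMap]
    congr 1
    funext g' p
    rw [List.map_map, List.foldl_map]
    rfl
  rw [hnest]
  set m' : List (Int × ((String × String) × Int)) := l.map (fun x => (x.2, x)) with hm'
  set groups := m'.foldl (fun gg x => gg.modify x.1 [] (· ++ [x.2]))
    (PySem.Dict.empty : PySem.Dict Int (List ((String × String) × Int))) with hgroups
  -- each bucket is the filter of the flat list at its count
  have hgetD : ∀ c : Int, groups.getD c [] = l.filter (fun y => decide (key y = c)) := by
    intro c
    rw [hgroups, PySem.Dict.getD_foldl_modify_append, PySem.Dict.getD_empty, List.nil_append,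
      hm', List.filter_map, List.map_map]
    have h1 : ((fun p : Int × ((String × String) × Int) => p.1 == c) ∘ (fun x => (x.2, x))) =
        (fun y : (String × String) × Int => decide (key y = c)) := by
      funext y; simp [hkey, Bool.beq_eq_decide_eq]
    have h2 : ((fun p : Int × ((String × String) × Int) => p.2) ∘ (fun x => (x.2, x))) = id := by
      funext y; rfl
    rw [h1, h2, List.map_id]
  -- the keys are exactly the distinct counts of the flat list
  have hkeys : groups.keys = PySem.Set.ofList (l.map key) := by
    rw [hgroups, PySem.Dict.keys_foldl_modify_key, PySem.Dict.keys_empty,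
      PySem.Set.update_nil_left, hm', List.map_map]
    rfl
  have hknodup : groups.keys.Nodup := by rw [hkeys]; exact PySem.Set.nodup_ofList _
  have hkmem : ∀ c, c ∈ groups.keys ↔ c ∈ l.map key := by
    intro c; rw [hkeys]; exact PySem.Set.mem_ofList _ _
  rw [← hm]
  congr 1
  rw [List.flatMap_congr (fun c _ => hgetD c)]
  exact (pvS_eq_buckets key l groups.keys hknodup hkmem).symm

-- ===== VERDICT (by name: the statement is the Claim_ definition above) =====
theorem co_occurrent_terms_spec : Claim_equal_co_occurrent_terms := by
  intro com n _ hn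
  unfold Spec_co_occurrent_terms
  exact pvPorts_eq com n hn
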